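-- pv_equiv track=rewrite | github.com/ayan-goel/os-from-scratch | tools/parse_trace.py | workload_summary
-- ===== SOURCE A (Python) =====
-- def workload_summary(records, intervals):
--     """
--     Per-pid totals. run_ticks is summed interval width (proxy for CPU
--     consumed); counts are simple event frequencies.
--     """
--     summary = {}
--     for pid, ivs in intervals.items():
--         summary.setdefault(pid, {"run_ticks": 0, "yields": 0,
--                                  "preempts": 0, "sleeps": 0, "spawns": 0,
--                                  "exits": 0, "wakes": 0})
--         summary[pid]["run_ticks"] = sum(e - s for s, e in ivs)
--
--     for _tick, pid, ev in records:
--         summary.setdefault(pid, {"run_ticks": 0, "yields": 0,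
--                                  "preempts": 0, "sleeps": 0, "spawns": 0,
--                                  "exits": 0, "wakes": 0})
--         key = {"YIELD": "yields", "PREEMPT": "preempts", "SLEEP": "sleeps",
--                "SPAWN": "spawns", "EXIT": "exits", "WAKE": "wakes"}.get(ev)
--         if key:
--             summary[pid][key] += 1
--
--     return summary
-- ===== SOURCE B (Python) =====
-- def workload_summary(records, intervals):
--     """Per-pid totals: build-table-then-distribute instead of inline increments."""
--     KEYMAP = {"YIELD": "yields", "PREEMPT": "preempts", "SLEEP": "sleeps",
--               "SPAWN": "spawns", "EXIT": "exits", "WAKE": "wakes"}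
--     COUNT_KEYS = ("yields", "preempts", "sleeps", "spawns", "exits", "wakes")
--     # all pids, intervals first then record pids, first occurrence kept
--     pids = dict.fromkeys(list(intervals) + [pid for _tick, pid, _ev in records])
--     # frequency table over (pid, mapped key) for recognized events only
--     freq = {}
--     for _tick, pid, ev in records:
--         key = KEYMAP.get(ev)
--         if key:
--             freq[(pid, key)] = freq.get((pid, key), 0) + 1
--     out = {}
--     for p in pids:
--         d = {"run_ticks": sum(e - s for s, e in intervals.get(p, ()))}
--         for k in COUNT_KEYS:
--             d[k] = freq.get((p, k), 0)
--         out[p] = d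
--     return out
-- ===== Notes on version B (the rewrite author's own statement) =====
-- stated objective: alternative
-- what changed: A fills per-pid dicts with inline setdefault-and-increment across two passes; B first derives the pid set from intervals plus all records, builds a separate (pid,key) frequency table over recognized events, and then constructs each pid's zero-based summary dict in one final distribution loop.
import Mathlib
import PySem

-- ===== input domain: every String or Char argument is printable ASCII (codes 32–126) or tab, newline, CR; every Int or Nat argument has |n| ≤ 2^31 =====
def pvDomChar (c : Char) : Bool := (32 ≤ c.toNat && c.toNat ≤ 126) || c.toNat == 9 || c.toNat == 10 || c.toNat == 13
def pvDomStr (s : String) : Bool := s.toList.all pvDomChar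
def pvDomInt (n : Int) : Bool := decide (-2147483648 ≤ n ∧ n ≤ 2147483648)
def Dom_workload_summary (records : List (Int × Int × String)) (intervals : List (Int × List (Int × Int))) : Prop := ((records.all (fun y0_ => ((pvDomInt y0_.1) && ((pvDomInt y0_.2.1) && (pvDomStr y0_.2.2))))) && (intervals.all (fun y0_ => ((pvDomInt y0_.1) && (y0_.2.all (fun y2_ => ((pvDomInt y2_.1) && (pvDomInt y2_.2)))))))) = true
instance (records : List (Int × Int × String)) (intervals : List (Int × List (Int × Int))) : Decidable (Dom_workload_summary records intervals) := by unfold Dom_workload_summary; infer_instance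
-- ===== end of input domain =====

-- B replaces A's two inline setdefault-and-increment passes by a build-table-then-distribute
-- decomposition (pid set + frequency table first, summaries assembled last); same cost,
-- return-value equivalence (neither version mutates its arguments).

-- ===== PORT A =====
-- the zero-filled per-pid dict literal A's setdefault uses
def pvZeros : PySem.Dict String Int :=
  PySem.Dict.mk [("run_ticks", 0), ("yields", 0), ("preempts", 0), ("sleeps", 0),
                 ("spawns", 0), ("exits", 0), ("wakes", 0)]

-- the event-name → counter-key dict literal
def pvKeymap : PySem.Dict String String :=
  PySem.Dict.mk [("YIELD", "yields"), ("PREEMPT", "preempts"), ("SLEEP", "sleeps"),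
                 ("SPAWN", "spawns"), ("EXIT", "exits"), ("WAKE", "wakes")]

-- sum(e - s for s, e in ivs)
def pvWidths (ivs : List (Int × Int)) : Int := (ivs.map (fun iv => iv.2 - iv.1)).sum

-- body of A's first loop (setdefault, then assign run_ticks)
def pvStep1 (s : PySem.Dict Int (PySem.Dict String Int)) (pr : Int × List (Int × Int)) :
    PySem.Dict Int (PySem.Dict String Int) :=
  let s' := s.setdefault pr.1 pvZeros
  s'.insert pr.1 ((s'.getD pr.1 pvZeros).insert "run_ticks" (pvWidths pr.2))

-- body of A's second loop (setdefault, then increment the mapped key if recognized)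
def pvStep2 (s : PySem.Dict Int (PySem.Dict String Int)) (r : Int × Int × String) :
    PySem.Dict Int (PySem.Dict String Int) :=
  let s' := s.setdefault r.2.1 pvZeros
  match pvKeymap.get? r.2.2 with
  | some k => s'.modify r.2.1 pvZeros (fun d => d.insert k (d.getD k 0 + 1))
  | none => s'

def workload_summary (records : List (Int × Int × String)) (intervals : List (Int × List (Int × Int))) : List (Int × List (String × Int)) :=
  let ivd := PySem.Dict.ofList intervals     -- the dict argument, Python dict(pairs) semantics
  let s1 := ivd.items.foldl pvStep1 PySem.Dict.empty
  let s2 := records.foldl pvStep2 s1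
  s2.items.map (fun pr => (pr.1, pr.2.items))

-- ===== PORT B =====
-- the six counter keys, in A's literal order after run_ticks
def pvCountKeys : List String := ["yields", "preempts", "sleeps", "spawns", "exits", "wakes"]

-- body of B's tally loop over records: freq[(pid, key)] += 1 for recognized events
def pvFreqStep (f : PySem.Dict (Int × String) Int) (r : Int × Int × String) :
    PySem.Dict (Int × String) Int :=
  match pvKeymap.get? r.2.2 with
  | some k => f.insert (r.2.1, k) (f.getD (r.2.1, k) 0 + 1)
  | none => f

def workload_summary_alt (records : List (Int × Int × String)) (intervals : List (Int × List (Int × Int))) : List (Int × List (String × Int)) :=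
  let ivd := PySem.Dict.ofList intervals     -- the dict argument, Python dict(pairs) semantics
  -- pids = dict.fromkeys(list(intervals) + [pid for _, pid, _ in records])
  let pids := PySem.List.dedup (ivd.keys ++ records.map (fun r => r.2.1))
  -- frequency table over (pid, mapped key)
  let freq := records.foldl pvFreqStep (PySem.Dict.empty : PySem.Dict (Int × String) Int)
  -- distribute: one summary dict per pid
  let out := pids.foldl (fun o p =>
      let d : PySem.Dict String Int :=
        PySem.Dict.mk [("run_ticks", pvWidths (ivd.getD p []))]
      let d := pvCountKeys.foldl (fun d k => d.insert k (freq.getD (p, k) 0)) d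
      o.insert p d) (PySem.Dict.empty : PySem.Dict Int (PySem.Dict String Int))
  out.items.map (fun pr => (pr.1, pr.2.items))

-- ===== PRECONDITION & SPEC =====
def Spec_workload_summary (records : List (Int × Int × String)) (intervals : List (Int × List (Int × Int))) (out : List (Int × List (String × Int))) : Prop := out = workload_summary_alt records intervals
instance (records : List (Int × Int × String)) (intervals : List (Int × List (Int × Int))) (out : List (Int × List (String × Int))) : Decidable (Spec_workload_summary records intervals out) := by unfold Spec_workload_summary; infer_instance

-- ===== CLAIM (what is proved, stated in full; the proofs are below) =====
def Claim_equal_workload_summary : Prop := ∀ (records : List (Int × Int × String)) (intervals : List (Int × List (Int × Int))), Dom_workload_summary records intervals → Spec_workload_summary records intervals (workload_summary records intervals)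

-- ===== LEMMAS AND PROOFS =====

-- the single-event increment A's second loop performs on one pid's dict
def pvInc (d : PySem.Dict String Int) (e : String) : PySem.Dict String Int :=
  match pvKeymap.get? e with
  | some k => d.insert k (d.getD k 0 + 1)
  | none => d

-- how often the events `evs` bump counter key k
def pvCnt (evs : List String) (k : String) : Int :=
  (evs.countP (fun e => pvKeymap.get? e == some k) : Int)

theorem pvStep1_keys (s : PySem.Dict Int (PySem.Dict String Int)) (a : Int × List (Int × Int)) :
    (pvStep1 s a).keys = PySem.Set.add s.keys a.1 := by
  unfold pvStep1
  rw [PySem.Dict.keys_insert_of_contains _ _ (by simp [PySem.Dict.contains_setdefault]),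
      PySem.Dict.keys_setdefault, PySem.Set.add_eq_ite]
  simp [PySem.Dict.contains_eq_decide_mem_keys]

theorem loop1_keys (l : List (Int × List (Int × Int))) (s : PySem.Dict Int (PySem.Dict String Int)) :
    (l.foldl pvStep1 s).keys = PySem.Set.update s.keys (l.map (·.1)) := by
  induction l generalizing s with
  | nil => simp [PySem.Set.update_nil]
  | cons a l ih =>
    rw [List.foldl_cons, ih, List.map_cons, PySem.Set.update_cons, pvStep1_keys]

theorem pvStep1_getD (s : PySem.Dict Int (PySem.Dict String Int)) (a : Int × List (Int × Int)) (p : Int) :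
    (pvStep1 s a).getD p pvZeros =
      if p = a.1 then (s.getD p pvZeros).insert "run_ticks" (pvWidths a.2)
      else s.getD p pvZeros := by
  unfold pvStep1
  split_ifs with h
  · subst h
    rw [PySem.Dict.getD_insert_self, PySem.Dict.getD_setdefault_self]
  · rw [PySem.Dict.getD_eq_get?_getD, PySem.Dict.get?_insert_of_ne _ _ h,
        PySem.Dict.get?_setdefault_of_ne _ _ h, ← PySem.Dict.getD_eq_get?_getD]

theorem loop1_getD_not_mem (l : List (Int × List (Int × Int))) (s : PySem.Dict Int (PySem.Dict String Int))
    (p : Int) (hp : p ∉ l.map (·.1)) :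
    (l.foldl pvStep1 s).getD p pvZeros = s.getD p pvZeros := by
  induction l generalizing s with
  | nil => rfl
  | cons a l ih =>
    simp only [List.map_cons, List.mem_cons, not_or] at hp
    rw [List.foldl_cons, ih _ hp.2, pvStep1_getD, if_neg hp.1]

theorem loop1_getD_mem (l : List (Int × List (Int × Int))) (s : PySem.Dict Int (PySem.Dict String Int))
    (p : Int) (ivs : List (Int × Int)) (hnd : (l.map (·.1)).Nodup) (hm : (p, ivs) ∈ l) :
    (l.foldl pvStep1 s).getD p pvZeros = (s.getD p pvZeros).insert "run_ticks" (pvWidths ivs) := by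
  induction l generalizing s with
  | nil => cases hm
  | cons a l ih =>
    simp only [List.map_cons, List.nodup_cons] at hnd
    rcases List.mem_cons.mp hm with h | h
    · subst h
      have hpl : p ∉ l.map (·.1) := by simpa using hnd.1
      rw [List.foldl_cons, loop1_getD_not_mem _ _ _ hpl, pvStep1_getD, if_pos rfl]
    · have hpa : p ≠ a.1 := by
        intro hh
        exact hnd.1 (hh ▸ (List.mem_map.mpr ⟨(p, ivs), h, rfl⟩))
      rw [List.foldl_cons, ih _ hnd.2 h, pvStep1_getD, if_neg hpa]

theorem pvStep2_keys (s : PySem.Dict Int (PySem.Dict String Int)) (r : Int × Int × String) :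
    (pvStep2 s r).keys = PySem.Set.add s.keys r.2.1 := by
  unfold pvStep2
  have hsd : (s.setdefault r.2.1 pvZeros).keys = PySem.Set.add s.keys r.2.1 := by
    rw [PySem.Dict.keys_setdefault, PySem.Set.add_eq_ite]
    simp [PySem.Dict.contains_eq_decide_mem_keys]
  cases h : pvKeymap.get? r.2.2 with
  | none => simpa [h] using hsd
  | some k =>
    rw [PySem.Dict.keys_modify,
        PySem.Dict.keys_insert_of_contains _ _ (by simp [PySem.Dict.contains_setdefault]), hsd]

theorem loop2_keys (rs : List (Int × Int × String)) (s : PySem.Dict Int (PySem.Dict String Int)) :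
    (rs.foldl pvStep2 s).keys = PySem.Set.update s.keys (rs.map (·.2.1)) := by
  induction rs generalizing s with
  | nil => simp [PySem.Set.update_nil]
  | cons r rs ih =>
    rw [List.foldl_cons, ih, List.map_cons, PySem.Set.update_cons, pvStep2_keys]

theorem pvStep2_getD (s : PySem.Dict Int (PySem.Dict String Int)) (r : Int × Int × String) (p : Int) :
    (pvStep2 s r).getD p pvZeros =
      if r.2.1 = p then pvInc (s.getD p pvZeros) r.2.2 else s.getD p pvZeros := by
  unfold pvStep2 pvInc
  split_ifs with h
  · subst h
    have hsd : (s.setdefault r.2.1 pvZeros).getD r.2.1 pvZeros = s.getD r.2.1 pvZeros :=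
      PySem.Dict.getD_setdefault_self _ _ _ _
    cases hk : pvKeymap.get? r.2.2 with
    | none => simpa [hk] using hsd
    | some k =>
      rw [PySem.Dict.getD_modify_self, hsd]
  · have hne : p ≠ r.2.1 := fun hh => h hh.symm
    have hsd : (s.setdefault r.2.1 pvZeros).getD p pvZeros = s.getD p pvZeros := by
      rw [PySem.Dict.getD_eq_get?_getD, PySem.Dict.get?_setdefault_of_ne _ _ hne,
          ← PySem.Dict.getD_eq_get?_getD]
    cases hk : pvKeymap.get? r.2.2 with
    | none => simpa [hk] using hsd
    | some k =>
      rw [PySem.Dict.getD_modify_of_ne _ _ _ hne, hsd]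

theorem loop2_getD (rs : List (Int × Int × String)) (s : PySem.Dict Int (PySem.Dict String Int)) (p : Int) :
    (rs.foldl pvStep2 s).getD p pvZeros =
      ((rs.filter (fun r => r.2.1 == p)).map (fun r => r.2.2)).foldl pvInc (s.getD p pvZeros) := by
  induction rs generalizing s with
  | nil => rfl
  | cons r rs ih =>
    rw [List.foldl_cons, ih]
    by_cases h : r.2.1 = p
    · rw [List.filter_cons_of_pos (by simpa using h), List.map_cons, List.foldl_cons,
          pvStep2_getD, if_pos h]
    · rw [List.filter_cons_of_neg (by simpa using h), pvStep2_getD, if_neg h]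

theorem keymap_none (e : String) (h1 : e ≠ "YIELD") (h2 : e ≠ "PREEMPT") (h3 : e ≠ "SLEEP")
    (h4 : e ≠ "SPAWN") (h5 : e ≠ "EXIT") (h6 : e ≠ "WAKE") : pvKeymap.get? e = none := by
  have g1 : (("YIELD" : String) == e) = false := by simp [Ne.symm h1]
  have g2 : (("PREEMPT" : String) == e) = false := by simp [Ne.symm h2]
  have g3 : (("SLEEP" : String) == e) = false := by simp [Ne.symm h3]
  have g4 : (("SPAWN" : String) == e) = false := by simp [Ne.symm h4]
  have g5 : (("EXIT" : String) == e) = false := by simp [Ne.symm h5]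
  have g6 : (("WAKE" : String) == e) = false := by simp [Ne.symm h6]
  simp [pvKeymap, PySem.Dict.get?, List.find?, g1, g2, g3, g4, g5, g6]

theorem incFold (evs : List String) (t a b c d e f : Int) :
    evs.foldl pvInc (PySem.Dict.mk [("run_ticks", t), ("yields", a), ("preempts", b), ("sleeps", c), ("spawns", d), ("exits", e), ("wakes", f)]) =
    PySem.Dict.mk [("run_ticks", t), ("yields", a + pvCnt evs "yields"),
        ("preempts", b + pvCnt evs "preempts"), ("sleeps", c + pvCnt evs "sleeps"),
        ("spawns", d + pvCnt evs "spawns"), ("exits", e + pvCnt evs "exits"),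
        ("wakes", f + pvCnt evs "wakes")] := by
  induction evs generalizing a b c d e f with
  | nil => simp [pvCnt]
  | cons e0 evs ih =>
    rw [List.foldl_cons]
    by_cases hyields : e0 = "YIELD"
    · subst hyields
      have hstep : pvInc (PySem.Dict.mk [("run_ticks", t), ("yields", a), ("preempts", b), ("sleeps", c), ("spawns", d), ("exits", e), ("wakes", f)]) "YIELD"
          = PySem.Dict.mk [("run_ticks", t), ("yields", a + 1), ("preempts", b), ("sleeps", c), ("spawns", d), ("exits", e), ("wakes", f)] := rfl
      rw [hstep, ih]
      simp only [pvCnt, List.countP_cons, PySem.Dict.mk.injEq, List.cons.injEq, Prod.mk.injEq,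
          show  (pvKeymap.get? "YIELD" == some "yields") = true from rfl,
         show  (pvKeymap.get? "YIELD" == some "preempts") = false from rfl,
         show  (pvKeymap.get? "YIELD" == some "sleeps") = false from rfl,
         show  (pvKeymap.get? "YIELD" == some "spawns") = false from rfl,
         show  (pvKeymap.get? "YIELD" == some "exits") = false from rfl,
         show  (pvKeymap.get? "YIELD" == some "wakes") = false from rfl]
      push_cast
      simp only [true_and, and_true]
      omega
    by_cases hpreempts : e0 = "PREEMPT"
    · subst hpreempts
      have hstep : pvInc (PySem.Dict.mk [("run_ticks", t), ("yields", a), ("preempts", b), ("sleeps", c), ("spawns", d), ("exits", e), ("wakes", f)]) "PREEMPT"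
          = PySem.Dict.mk [("run_ticks", t), ("yields", a), ("preempts", b + 1), ("sleeps", c), ("spawns", d), ("exits", e), ("wakes", f)] := rfl
      rw [hstep, ih]
      simp only [pvCnt, List.countP_cons, PySem.Dict.mk.injEq, List.cons.injEq, Prod.mk.injEq,
          show  (pvKeymap.get? "PREEMPT" == some "yields") = false from rfl,
         show  (pvKeymap.get? "PREEMPT" == some "preempts") = true from rfl,
         show  (pvKeymap.get? "PREEMPT" == some "sleeps") = false from rfl,
         show  (pvKeymap.get? "PREEMPT" == some "spawns") = false from rfl,
         show  (pvKeymap.get? "PREEMPT" == some "exits") = false from rfl,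
         show  (pvKeymap.get? "PREEMPT" == some "wakes") = false from rfl]
      push_cast
      simp only [true_and, and_true]
      omega
    by_cases hsleeps : e0 = "SLEEP"
    · subst hsleeps
      have hstep : pvInc (PySem.Dict.mk [("run_ticks", t), ("yields", a), ("preempts", b), ("sleeps", c), ("spawns", d), ("exits", e), ("wakes", f)]) "SLEEP"
          = PySem.Dict.mk [("run_ticks", t), ("yields", a), ("preempts", b), ("sleeps", c + 1), ("spawns", d), ("exits", e), ("wakes", f)] := rfl
      rw [hstep, ih]
      simp only [pvCnt, List.countP_cons, PySem.Dict.mk.injEq, List.cons.injEq, Prod.mk.injEq,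
          show  (pvKeymap.get? "SLEEP" == some "yields") = false from rfl,
         show  (pvKeymap.get? "SLEEP" == some "preempts") = false from rfl,
         show  (pvKeymap.get? "SLEEP" == some "sleeps") = true from rfl,
         show  (pvKeymap.get? "SLEEP" == some "spawns") = false from rfl,
         show  (pvKeymap.get? "SLEEP" == some "exits") = false from rfl,
         show  (pvKeymap.get? "SLEEP" == some "wakes") = false from rfl]
      push_cast
      simp only [true_and, and_true]
      omega
    by_cases hspawns : e0 = "SPAWN"
    · subst hspawns
      have hstep : pvInc (PySem.Dict.mk [("run_ticks", t), ("yields", a), ("preempts", b), ("sleeps", c), ("spawns", d), ("exits", e), ("wakes", f)]) "SPAWN"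
          = PySem.Dict.mk [("run_ticks", t), ("yields", a), ("preempts", b), ("sleeps", c), ("spawns", d + 1), ("exits", e), ("wakes", f)] := rfl
      rw [hstep, ih]
      simp only [pvCnt, List.countP_cons, PySem.Dict.mk.injEq, List.cons.injEq, Prod.mk.injEq,
          show  (pvKeymap.get? "SPAWN" == some "yields") = false from rfl,
         show  (pvKeymap.get? "SPAWN" == some "preempts") = false from rfl,
         show  (pvKeymap.get? "SPAWN" == some "sleeps") = false from rfl,
         show  (pvKeymap.get? "SPAWN" == some "spawns") = true from rfl,
         show  (pvKeymap.get? "SPAWN" == some "exits") = false from rfl,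
         show  (pvKeymap.get? "SPAWN" == some "wakes") = false from rfl]
      push_cast
      simp only [true_and, and_true]
      omega
    by_cases hexits : e0 = "EXIT"
    · subst hexits
      have hstep : pvInc (PySem.Dict.mk [("run_ticks", t), ("yields", a), ("preempts", b), ("sleeps", c), ("spawns", d), ("exits", e), ("wakes", f)]) "EXIT"
          = PySem.Dict.mk [("run_ticks", t), ("yields", a), ("preempts", b), ("sleeps", c), ("spawns", d), ("exits", e + 1), ("wakes", f)] := rfl
      rw [hstep, ih]
      simp only [pvCnt, List.countP_cons, PySem.Dict.mk.injEq, List.cons.injEq, Prod.mk.injEq,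
          show  (pvKeymap.get? "EXIT" == some "yields") = false from rfl,
         show  (pvKeymap.get? "EXIT" == some "preempts") = false from rfl,
         show  (pvKeymap.get? "EXIT" == some "sleeps") = false from rfl,
         show  (pvKeymap.get? "EXIT" == some "spawns") = false from rfl,
         show  (pvKeymap.get? "EXIT" == some "exits") = true from rfl,
         show  (pvKeymap.get? "EXIT" == some "wakes") = false from rfl]
      push_cast
      simp only [true_and, and_true]
      omega
    by_cases hwakes : e0 = "WAKE"
    · subst hwakes
      have hstep : pvInc (PySem.Dict.mk [("run_ticks", t), ("yields", a), ("preempts", b), ("sleeps", c), ("spawns", d), ("exits", e), ("wakes", f)]) "WAKE"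
          = PySem.Dict.mk [("run_ticks", t), ("yields", a), ("preempts", b), ("sleeps", c), ("spawns", d), ("exits", e), ("wakes", f + 1)] := rfl
      rw [hstep, ih]
      simp only [pvCnt, List.countP_cons, PySem.Dict.mk.injEq, List.cons.injEq, Prod.mk.injEq,
          show  (pvKeymap.get? "WAKE" == some "yields") = false from rfl,
         show  (pvKeymap.get? "WAKE" == some "preempts") = false from rfl,
         show  (pvKeymap.get? "WAKE" == some "sleeps") = false from rfl,
         show  (pvKeymap.get? "WAKE" == some "spawns") = false from rfl,
         show  (pvKeymap.get? "WAKE" == some "exits") = false from rfl,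
         show  (pvKeymap.get? "WAKE" == some "wakes") = true from rfl]
      push_cast
      simp only [true_and, and_true]
      omega
    have hn : pvKeymap.get? e0 = none := keymap_none e0 hyields hpreempts hsleeps hspawns hexits hwakes
    have hstep : pvInc (PySem.Dict.mk [("run_ticks", t), ("yields", a), ("preempts", b), ("sleeps", c), ("spawns", d), ("exits", e), ("wakes", f)]) e0
        = PySem.Dict.mk [("run_ticks", t), ("yields", a), ("preempts", b), ("sleeps", c), ("spawns", d), ("exits", e), ("wakes", f)] := by
      unfold pvInc; rw [hn]
    rw [hstep, ih]
    simp only [pvCnt, List.countP_cons, hn]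
    simp

theorem freq_getD (rs : List (Int × Int × String)) (f : PySem.Dict (Int × String) Int) (p : Int) (k : String) :
    (rs.foldl pvFreqStep f).getD (p, k) 0 =
      f.getD (p, k) 0 + (rs.countP (fun r => r.2.1 == p && pvKeymap.get? r.2.2 == some k) : Int) := by
  induction rs generalizing f with
  | nil => simp
  | cons r rs ih =>
    rw [List.foldl_cons, List.countP_cons, ih]
    cases hk : pvKeymap.get? r.2.2 with
    | none =>
      simp [pvFreqStep, hk]
    | some k0 =>
      have hstep : pvFreqStep f r = f.insert (r.2.1, k0) (f.getD (r.2.1, k0) 0 + 1) := by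
        unfold pvFreqStep; rw [hk]
      rw [hstep, PySem.Dict.getD_insert]
      by_cases hp : (p, k) = (r.2.1, k0)
      · rw [if_pos hp]
        rcases Prod.mk.injEq .. ▸ hp with ⟨h1, h2⟩
        simp [← h1, ← h2]
        omega
      · rw [if_neg hp]
        simp
        intro h1 h2
        exact hp (by simp [h1, h2])

theorem cnt_eq (records : List (Int × Int × String)) (p : Int) (k : String) :
    pvCnt ((records.filter (fun r => r.2.1 == p)).map (fun r => r.2.2)) k =
      (records.countP (fun r => r.2.1 == p && pvKeymap.get? r.2.2 == some k) : Int) := by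
  unfold pvCnt
  rw [List.countP_map, List.countP_filter]
  congr 1
  exact List.countP_congr (fun r _ => by simp [Function.comp, Bool.and_comm])

-- s1's per-pid value, uniform over all pids
theorem s1_getD (intervals : List (Int × List (Int × Int))) (p : Int) :
    (((PySem.Dict.ofList intervals).items.foldl pvStep1 PySem.Dict.empty).getD p pvZeros)
      = pvZeros.insert "run_ticks" (pvWidths ((PySem.Dict.ofList intervals).getD p [])) := by
  set ivd := PySem.Dict.ofList intervals with hivd
  have hnd : ivd.keys.Nodup := PySem.Dict.nodup_keys_ofList intervals
  by_cases hc : ivd.contains p = true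
  · have hs : (ivd.get? p).isSome := by
      rw [← PySem.Dict.contains_eq_isSome_get?]; exact hc
    obtain ⟨v, hv⟩ := Option.isSome_iff_exists.mp hs
    have hmem : (p, v) ∈ ivd.items := (PySem.Dict.get?_eq_some_iff_mem_items ivd p v hnd).mp hv
    have hgd : ivd.getD p [] = v := PySem.Dict.getD_of_get?_eq_some ivd [] hv
    rw [hgd, loop1_getD_mem ivd.items PySem.Dict.empty p v hnd hmem]
    rfl
  · have hc' : ivd.contains p = false := by simpa using hc
    have hp : p ∉ ivd.items.map (·.1) := by
      intro hmem
      exact (by simp [hc'] : ¬ (ivd.contains p = true))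
        ((PySem.Dict.contains_iff_mem_keys ivd p).mpr hmem)
    rw [loop1_getD_not_mem _ _ _ hp, PySem.Dict.getD_of_not_contains _ _ hc']
    rfl

-- ===== VERDICT (by name: the statement is the Claim_ definition above) =====
theorem workload_summary_spec : Claim_equal_workload_summary := by
  intro records intervals _
  unfold Spec_workload_summary
  simp only [workload_summary, workload_summary_alt]
  set ivd := PySem.Dict.ofList intervals with hivd
  have hnd : ivd.keys.Nodup := PySem.Dict.nodup_keys_ofList intervals
  set rp := records.map (fun r => r.2.1) with hrp
  set s1 := ivd.items.foldl pvStep1 PySem.Dict.empty with hs1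
  set s2 := records.foldl pvStep2 s1 with hs2
  set freq := records.foldl pvFreqStep (PySem.Dict.empty : PySem.Dict (Int × String) Int) with hfreq
  have h_s1keys : s1.keys = ivd.keys := by
    rw [hs1, loop1_keys]
    have he : (PySem.Dict.empty : PySem.Dict Int (PySem.Dict String Int)).keys = ([] : List Int) := rfl
    rw [he, PySem.Set.update_nil_left]
    have : ivd.items.map (·.1) = ivd.keys := rfl
    rw [this, PySem.Set.ofList_eq_self_of_nodup _ hnd]
  have h_s2keys : s2.keys = PySem.Set.update ivd.keys rp := by
    rw [hs2, loop2_keys, h_s1keys]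
  have h_s2nodup : s2.keys.Nodup := by
    rw [h_s2keys]; exact PySem.Set.nodup_update _ _ hnd
  have h_pids : PySem.List.dedup (ivd.keys ++ rp) = PySem.Set.update ivd.keys rp := by
    rw [PySem.List.dedup_eq_ofList, PySem.Set.ofList_append,
        PySem.Set.ofList_eq_self_of_nodup _ hnd]
  -- LHS: A's summary items, via the keys of s2
  rw [PySem.Dict.items_eq_map_keys s2 h_s2nodup pvZeros, List.map_map]
  -- RHS: B's distribution loop over fresh distinct pids
  rw [PySem.Dict.items_foldl_insert_fresh _ (fun p => p) _ _
        (fun a _ => PySem.Dict.contains_empty a)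
        (by simp only [List.map_id_fun']
            rw [h_pids]; exact PySem.Set.nodup_update _ _ hnd)]
  simp only [show (PySem.Dict.empty : PySem.Dict Int (PySem.Dict String Int)).items = [] from rfl,
      List.nil_append, List.map_map]
  rw [h_pids, h_s2keys]
  refine List.map_congr_left (fun p _ => ?_)
  simp only [Function.comp]
  congr 1
  -- per-pid: A's incrementally built dict equals B's distributed one, item for item
  have hbase : s1.getD p pvZeros
      = pvZeros.insert "run_ticks" (pvWidths (ivd.getD p [])) := s1_getD intervals p
  have hA : s2.getD p pvZeros =
      ((records.filter (fun r => r.2.1 == p)).map (fun r => r.2.2)).foldl pvInc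
        (pvZeros.insert "run_ticks" (pvWidths (ivd.getD p []))) := by
    rw [hs2, loop2_getD, hbase]
  set evs := (records.filter (fun r => r.2.1 == p)).map (fun r => r.2.2) with hevs
  have hlit : pvZeros.insert "run_ticks" (pvWidths (ivd.getD p []))
      = PySem.Dict.mk [("run_ticks", pvWidths (ivd.getD p [])), ("yields", 0), ("preempts", 0),
          ("sleeps", 0), ("spawns", 0), ("exits", 0), ("wakes", 0)] := rfl
  rw [hA, hlit, incFold]
  have hBin : (pvCountKeys.foldl (fun d k => d.insert k (freq.getD (p, k) 0))
      (PySem.Dict.mk [("run_ticks", pvWidths (ivd.getD p []))])).items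
      = ("run_ticks", pvWidths (ivd.getD p [])) ::
        pvCountKeys.map (fun k => (k, freq.getD (p, k) 0)) := by
    rw [PySem.Dict.items_foldl_insert_fresh pvCountKeys (fun k => k)
          (fun k => freq.getD (p, k) 0) _
          (by intro a ha; fin_cases ha <;> rfl)
          (by simp only [List.map_id_fun']; decide)]
    rfl
  have hfq : ∀ k, freq.getD (p, k) 0
      = (records.countP (fun r => r.2.1 == p && pvKeymap.get? r.2.2 == some k) : Int) := by
    intro k
    rw [hfreq, freq_getD]
    simp
  rw [hBin]
  simp only [pvCountKeys, List.map_cons, List.map_nil, hfq, ← cnt_eq, ← hevs, zero_add]
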